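-- pv_equiv track=rewrite | github.com/eliewolfe/mDAG-analysis | utilities.py | maximal_sets_within
-- ===== SOURCE A (Python) =====
-- from typing import Any, Iterable, Tuple, Union, List, Set
--
-- def maximal_sets_within(list_of_sets: List[Set[Any]]) -> List[Set[Any]]:
--     original_list_copy = list_of_sets.copy()
--     verified_maximal = []
--     for i in range(len(list_of_sets)):
--         candidate_maximal_set = original_list_copy.pop()
--         if not any(counterexample.issuperset(candidate_maximal_set) for counterexample in (original_list_copy + verified_maximal)):
--             verified_maximal.append(candidate_maximal_set)
--     return verified_maximal
-- ===== SOURCE B (Python) =====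
-- from typing import Any, List, Set
--
-- def maximal_sets_within(list_of_sets: List[Set[Any]]) -> List[Set[Any]]:
--     kept = [s for i, s in enumerate(list_of_sets)
--             if not any(t >= s for t in list_of_sets[:i])
--             and not any(t > s for t in list_of_sets[i + 1:])]
--     return kept[::-1]
-- ===== Notes on version B (the rewrite author's own statement) =====
-- stated objective: simpler
-- what changed: A pops sets off a shrinking copy while testing each candidate against the remaining copy plus the accumulated verified list; B is a stateless one-liner that keeps a set iff no earlier set is a superset and no later set is a proper superset, then reverses the kept list.
import Mathlib
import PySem

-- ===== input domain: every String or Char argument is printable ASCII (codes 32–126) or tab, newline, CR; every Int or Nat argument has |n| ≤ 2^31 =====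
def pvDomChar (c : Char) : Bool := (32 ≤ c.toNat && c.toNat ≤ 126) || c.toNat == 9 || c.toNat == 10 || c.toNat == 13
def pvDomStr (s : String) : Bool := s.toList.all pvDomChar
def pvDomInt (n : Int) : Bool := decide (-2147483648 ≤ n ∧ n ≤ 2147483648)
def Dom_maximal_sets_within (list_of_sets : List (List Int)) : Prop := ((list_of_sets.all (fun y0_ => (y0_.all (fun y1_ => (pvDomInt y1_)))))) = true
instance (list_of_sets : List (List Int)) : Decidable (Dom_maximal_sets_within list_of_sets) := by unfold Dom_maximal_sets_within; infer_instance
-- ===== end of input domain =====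

-- B replaces A's pop-from-the-end loop with its interacting accumulator state by a stateless
-- per-element filter (keep a set iff it has no superset earlier and no proper superset later
-- in the list) followed by a reverse; objective: simpler, same asymptotic cost.

-- ===== PORT A =====
-- counterexample.issuperset(candidate_maximal_set): a ⊇ b as finite sets of elements
def pvSup (a b : List Int) : Bool := b.all (fun x => a.contains x)

-- the body of A's for-loop (the loop variable i is never used by the body):
-- candidate_maximal_set = original_list_copy.pop(); test; maybe append to verified_maximal
def pvStepA (st : List (List Int) × List (List Int)) : List (List Int) × List (List Int) :=
  match PySem.List.pop? st.1 with
  | none => st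
  | some (cand, rest) =>
    if (rest ++ st.2).any (fun t => pvSup t cand) then (rest, st.2)
    else (rest, st.2 ++ [cand])

def maximal_sets_within (list_of_sets : List (List Int)) : List (List Int) :=
  ((PySem.List.pyRange 0 (list_of_sets.length) 1).foldl
      (fun st _ => pvStepA st) (list_of_sets, ([] : List (List Int)))).2

-- ===== PORT B =====
-- t > s : proper superset
def pvSSup (a b : List Int) : Bool := pvSup a b && !(pvSup b a)

-- kept = [s for i, s in enumerate(list_of_sets) if not any(t >= s for t in list_of_sets[:i])
--        and not any(t > s for t in list_of_sets[i+1:])]; return kept[::-1]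
def maximal_sets_within_alt (list_of_sets : List (List Int)) : List (List Int) :=
  (((PySem.List.enumerate list_of_sets).filter (fun p =>
      !((PySem.List.slice list_of_sets none (some p.1)).any (fun t => pvSup t p.2)) &&
      !((PySem.List.slice list_of_sets (some (p.1 + 1)) none).any (fun t => pvSSup t p.2)))).map
    (fun p => p.2)).reverse

-- ===== PRECONDITION & SPEC =====
def Spec_maximal_sets_within (list_of_sets : List (List Int)) (out : List (List Int)) : Prop := out = maximal_sets_within_alt list_of_sets
instance (list_of_sets : List (List Int)) (out : List (List Int)) : Decidable (Spec_maximal_sets_within list_of_sets out) := by unfold Spec_maximal_sets_within; infer_instance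

-- ===== CLAIM (what is proved, stated in full; the proofs are below) =====
def Claim_equal_maximal_sets_within : Prop := ∀ (list_of_sets : List (List Int)), Dom_maximal_sets_within list_of_sets → Spec_maximal_sets_within list_of_sets (maximal_sets_within list_of_sets)

-- ===== LEMMAS AND PROOFS =====

theorem pvSup_iff (a b : List Int) : pvSup a b = true ↔ ∀ x ∈ b, x ∈ a := by simp [pvSup]

theorem pvSup_refl (a : List Int) : pvSup a a = true := by simp [pvSup_iff]

theorem pvSup_trans {a b c : List Int} (h1 : pvSup a b = true) (h2 : pvSup b c = true) :
    pvSup a c = true := by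
  rw [pvSup_iff] at *
  exact fun x hx => h1 _ (h2 _ hx)

theorem pvSSup_irrefl (a : List Int) : pvSSup a a = false := by simp [pvSSup, pvSup_refl]

theorem pvSSup_iff (a b : List Int) :
    pvSSup a b = true ↔ pvSup a b = true ∧ ¬ pvSup b a = true := by simp [pvSSup]

-- A's loop rewritten as structural recursion over the reversed input
def fA : List (List Int) → List (List Int) → List (List Int)
  | [], v => v
  | c :: rest, v => fA rest (if (rest ++ v).any (fun t => pvSup t c) then v else v ++ [c])

-- B's selection generalized with a 'before' context: sets of the original list that come after
-- (in original order) everything in rest; they only contribute proper-superset tests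
def selR (before rest : List (List Int)) : List (List Int) :=
  (((PySem.List.enumerate rest.reverse).filter (fun p =>
      !((PySem.List.slice rest.reverse none (some p.1)).any (fun t => pvSup t p.2)) &&
      !(((PySem.List.slice rest.reverse (some (p.1 + 1)) none) ++ before).any
          (fun t => pvSSup t p.2)))).map (fun p => p.2)).reverse

-- loop invariant tying A's verified_maximal (v) to B's view: rest = sets still to process
-- (in A's pop order), before = sets already processed, v = those of before that A kept
def InvAB (before rest v : List (List Int)) : Prop :=
  (∀ c ∈ rest, (∃ d ∈ v, pvSup d c = true) → ∃ e ∈ before, pvSSup e c = true) ∧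
  (∀ c : List Int, (∀ e ∈ rest, ¬ pvSSup e c = true) → (∃ e ∈ before, pvSSup e c = true) →
      ∃ d ∈ v, pvSup d c = true)

theorem selR_nil (before : List (List Int)) : selR before [] = [] := by
  simp [selR]

theorem selR_cons (before : List (List Int)) (c : List Int) (rest' : List (List Int)) :
    selR before (c :: rest') =
      (if (rest'.any (fun t => pvSup t c) || before.any (fun t => pvSSup t c)) then []
       else [c]) ++ selR (before ++ [c]) rest' := by
  rw [selR, selR, List.reverse_cons, PySem.List.enumerate_append]
  rw [show PySem.List.enumerate [c] (0 + (rest'.reverse.length : Int))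
        = [((rest'.reverse.length : Int), c)] by
      simp [PySem.List.enumerate_cons, PySem.List.enumerate_nil]]
  rw [List.filter_append, List.map_append, List.reverse_append]
  congr 1
  -- the singleton: the head c of rest sits at the last position of rest.reverse
  · have h1 : PySem.List.slice (rest'.reverse ++ [c]) none (some ((rest'.reverse.length : Int)))
        = rest'.reverse := by
      rw [PySem.List.slice_to _ (by positivity)]
      simp
    have h2 : PySem.List.slice (rest'.reverse ++ [c]) (some ((rest'.reverse.length : Int) + 1)) none
        = [] := by
      rw [PySem.List.slice_from _ (by positivity)]
      apply List.drop_eq_nil_of_le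
      simp
    simp only [List.filter, h1, h2, List.nil_append, List.any_reverse]
    cases hx : rest'.any (fun t => pvSup t c) <;>
      cases hy : before.any (fun t => pvSSup t c) <;> simp_all
  -- the front part: pointwise the same filter as selR (before ++ [c]) rest'
  · refine congrArg List.reverse
      (congrArg (List.map (fun p : Int × List Int => p.2)) (List.filter_congr ?_))
    intro p hp
    rw [PySem.List.mem_enumerate_iff] at hp
    obtain ⟨k, hk, rfl⟩ := hp
    have hk1 : (0 + (k:Int)) = (k:Int) := by omega
    congr 1
    · rw [hk1, PySem.List.slice_to _ (by positivity), PySem.List.slice_to _ (by positivity)]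
      rw [Int.toNat_natCast, List.take_append_of_le_length (le_of_lt hk)]
    · rw [hk1, PySem.List.slice_from _ (by positivity), PySem.List.slice_from _ (by positivity)]
      have : ((k:Int) + 1).toNat = k + 1 := by omega
      rw [this, List.drop_append_of_le_length hk]
      simp [List.any_append, Bool.or_comm, Bool.or_assoc]

theorem keep_equiv (before : List (List Int)) (c : List Int) (rest' v : List (List Int))
    (h : InvAB before (c :: rest') v) :
    ((rest' ++ v).any (fun t => pvSup t c))
      = (rest'.any (fun t => pvSup t c) || before.any (fun t => pvSSup t c)) := by
  obtain ⟨h2, h3⟩ := h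
  rw [Bool.eq_iff_iff]
  simp only [List.any_append, Bool.or_eq_true, List.any_eq_true]
  constructor
  · rintro (⟨t, ht, hs⟩ | ⟨t, ht, hs⟩)
    · exact Or.inl ⟨t, ht, hs⟩
    · exact Or.inr (h2 c (List.mem_cons_self ..) ⟨t, ht, hs⟩)
  · rintro (⟨t, ht, hs⟩ | ⟨e, he, hs⟩)
    · exact Or.inl ⟨t, ht, hs⟩
    · by_cases hA : ∃ t ∈ rest', pvSup t c = true
      · exact Or.inl hA
      · refine Or.inr (h3 c ?_ ⟨e, he, hs⟩)
        intro e' he'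
        rcases List.mem_cons.mp he' with rfl | he'
        · simp [pvSSup_irrefl]
        · intro hss
          exact hA ⟨e', he', ((pvSSup_iff _ _).mp hss).1⟩

theorem inv_step (before : List (List Int)) (c : List Int) (rest' v : List (List Int))
    (h : InvAB before (c :: rest') v) :
    InvAB (before ++ [c]) rest'
      (if (rest' ++ v).any (fun t => pvSup t c) then v else v ++ [c]) := by
  obtain ⟨h2, h3⟩ := h
  by_cases hdrop : ((rest' ++ v).any (fun t => pvSup t c)) = true
  · -- c is dropped: v unchanged
    rw [if_pos hdrop]
    simp only [List.any_append, Bool.or_eq_true, List.any_eq_true] at hdrop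
    constructor
    · intro c' hc' hex
      obtain ⟨e, he, hse⟩ := h2 c' (List.mem_cons_of_mem _ hc') hex
      exact ⟨e, List.mem_append_left _ he, hse⟩
    · intro c' hrest hbef
      by_cases hcc : pvSSup c c' = true
      · -- c itself is a proper superset of c'; chase the set that killed c
        rcases hdrop with ⟨t, ht, hst⟩ | ⟨t, ht, hst⟩
        · -- killer in rest': then t is a proper superset of c' still to come — contradiction
          exfalso
          apply hrest t ht
          rw [pvSSup_iff] at hcc ⊢
          refine ⟨pvSup_trans hst hcc.1, fun hts => hcc.2 (pvSup_trans hts hst)⟩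
        · exact ⟨t, ht, pvSup_trans hst ((pvSSup_iff _ _).mp hcc).1⟩
      · -- the witness must lie in before
        obtain ⟨e, he, hse⟩ := hbef
        rcases (List.mem_append.mp he) with he | he
        · refine h3 c' ?_ ⟨e, he, hse⟩
          intro e' he'
          rcases List.mem_cons.mp he' with rfl | he'
          · exact hcc
          · exact hrest e' he'
        · rw [List.mem_singleton.mp he] at hse
          exact absurd hse hcc
  · -- c is kept: v' = v ++ [c]
    rw [if_neg hdrop]
    simp only [List.any_append, Bool.or_eq_true, List.any_eq_true, not_or, not_exists] at hdrop
    push Not at hdrop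
    constructor
    · intro c' hc' hex
      obtain ⟨d, hd, hsd⟩ := hex
      rcases List.mem_append.mp hd with hd | hd
      · obtain ⟨e, he, hse⟩ := h2 c' (List.mem_cons_of_mem _ hc') ⟨d, hd, hsd⟩
        exact ⟨e, List.mem_append_left _ he, hse⟩
      · rw [List.mem_singleton.mp hd] at hsd
        -- d = c ⊇ c'; if proper, c itself witnesses; else c' ⊇ c sits in rest' and kills c
        by_cases hcc : pvSSup c c' = true
        · exact ⟨c, List.mem_append_right _ (List.mem_singleton_self _), hcc⟩
        · exfalso
          rw [pvSSup_iff] at hcc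
          push Not at hcc
          exact hdrop.1 c' hc' (hcc hsd)
    · intro c' hrest hbef
      by_cases hcc : pvSSup c c' = true
      · exact ⟨c, List.mem_append_right _ (List.mem_singleton_self _),
          ((pvSSup_iff _ _).mp hcc).1⟩
      · obtain ⟨e, he, hse⟩ := hbef
        rcases List.mem_append.mp he with he | he
        · have hforall : ∀ e' ∈ c :: rest', ¬ pvSSup e' c' = true := by
            intro e' he'
            rcases List.mem_cons.mp he' with rfl | he'
            · exact hcc
            · exact hrest e' he'
          obtain ⟨d, hd, hsd⟩ := h3 c' hforall ⟨e, he, hse⟩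
          exact ⟨d, List.mem_append_left _ hd, hsd⟩
        · rw [List.mem_singleton.mp he] at hse
          exact absurd hse hcc

theorem mainAB : ∀ (rest before v : List (List Int)), InvAB before rest v →
    fA rest v = v ++ selR before rest := by
  intro rest
  induction rest with
  | nil => intro before v _; simp [fA, selR_nil]
  | cons c rest' ih =>
    intro before v h
    rw [fA, selR_cons, ih _ _ (inv_step before c rest' v h), keep_equiv before c rest' v h]
    by_cases hb : (rest'.any (fun t => pvSup t c) || before.any (fun t => pvSSup t c)) = true
    · simp [hb]
    · simp only [Bool.not_eq_true] at hb
      simp [hb]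

theorem foldl_ignore {α β : Type} (g : β → β) (xs : List α) (init : β) :
    xs.foldl (fun st _ => g st) init = g^[xs.length] init := by
  induction xs generalizing init with
  | nil => simp
  | cons x xs ih => simp [List.foldl_cons, ih, Function.iterate_succ_apply]

theorem iterA : ∀ (rcopy v : List (List Int)),
    pvStepA^[rcopy.length] (rcopy.reverse, v) = ([], fA rcopy v) := by
  intro rcopy
  induction rcopy with
  | nil => intro v; simp [fA]
  | cons c r ih =>
    intro v
    rw [List.reverse_cons, List.length_cons, Function.iterate_succ_apply]
    have hg : pvStepA (r.reverse ++ [c], v)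
        = (r.reverse, if (r ++ v).any (fun t => pvSup t c) then v else v ++ [c]) := by
      simp only [pvStepA, PySem.List.pop?_last, List.any_append, List.any_reverse]
      split <;> rfl
    rw [hg, ih]
    simp [fA]

theorem portA_eq (l : List (List Int)) : maximal_sets_within l = fA l.reverse [] := by
  have h := iterA l.reverse []
  rw [List.reverse_reverse, List.length_reverse] at h
  rw [maximal_sets_within, foldl_ignore, PySem.List.length_pyRange_one]
  simp [h]

theorem portB_eq (l : List (List Int)) : maximal_sets_within_alt l = selR [] l.reverse := by
  simp [maximal_sets_within_alt, selR]

-- ===== VERDICT (by name: the statement is the Claim_ definition above) =====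
theorem maximal_sets_within_spec : Claim_equal_maximal_sets_within := by
  intro l _
  show maximal_sets_within l = maximal_sets_within_alt l
  rw [portA_eq, portB_eq, mainAB l.reverse [] [] ?_]
  · simp
  · constructor
    · intro c _ hex
      obtain ⟨d, hd, _⟩ := hex
      cases hd
    · intro c _ hex
      obtain ⟨e, he, _⟩ := hex
      cases he
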